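-- pv_equiv track=rewrite | github.com/BartvonMeijenfeldt/advent_of_code_2023 | 14/part2.py | get_rounded_rocks_final_positions_for_col
-- ===== SOURCE A (Python) =====
-- def get_rounded_rocks_final_positions_for_col(col: list[str]) -> tuple[int]:
--     final_positions = []
--
--     start_rounded_rocks = 0
--     nr_rounded_rocks = 0
--
--     for i, c in enumerate(col):
--         if c == "O":
--             final_positions.append(start_rounded_rocks + nr_rounded_rocks)
--             nr_rounded_rocks += 1
--         elif c == "#":
--             start_rounded_rocks = i + 1
--             nr_rounded_rocks = 0
--
--     return tuple(final_positions)
-- ===== SOURCE B (Python) =====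
-- def get_rounded_rocks_final_positions_for_col(col: list[str]) -> tuple[int]:
--     # Segment view: split the column at '#' walls; each segment's rocks pile up
--     # contiguously from the segment start.
--     positions = []
--     offset = 0
--     rest = list(col)
--     while "#" in rest:
--         j = rest.index("#")
--         k = rest[:j].count("O")
--         positions.extend(range(offset, offset + k))
--         offset += j + 1
--         rest = rest[j + 1:]
--     positions.extend(range(offset, offset + rest.count("O")))
--     return tuple(positions)
-- ===== Notes on version B (the rewrite author's own statement) =====
-- stated objective: alternative
-- what changed: A walks the column cell by cell keeping a running segment-start/rock-count state; B instead partitions the column at each '#' wall (membership test + index + slice), counts the 'O's in the segment before the wall with list.count, and emits the whole contiguous range of final positions per segment at once.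
import Mathlib
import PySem

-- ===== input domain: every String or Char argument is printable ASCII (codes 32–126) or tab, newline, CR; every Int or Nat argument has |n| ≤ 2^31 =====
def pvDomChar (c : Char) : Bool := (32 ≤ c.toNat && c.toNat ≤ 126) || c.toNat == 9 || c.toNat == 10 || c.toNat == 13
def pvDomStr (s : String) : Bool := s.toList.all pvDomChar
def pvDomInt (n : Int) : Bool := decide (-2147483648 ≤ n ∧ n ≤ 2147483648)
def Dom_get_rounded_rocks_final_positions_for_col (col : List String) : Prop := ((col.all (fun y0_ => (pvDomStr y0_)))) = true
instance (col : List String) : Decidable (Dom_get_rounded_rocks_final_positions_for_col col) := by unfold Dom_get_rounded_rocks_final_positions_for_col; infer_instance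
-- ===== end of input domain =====

-- B replaces A's per-cell running-counter pass by a per-segment pass (find each '#' wall,
-- count the 'O's in the segment before it, emit a contiguous range): alternative decomposition.

-- ===== PORT A =====
def get_rounded_rocks_final_positions_for_col (col : List String) : List Int :=
  ((PySem.List.enumerate col 0).foldl
      (fun (st : List Int × Int × Int) ic =>
        if ic.2 = "O" then (st.1 ++ [st.2.1 + st.2.2], st.2.1, st.2.2 + 1)
        else if ic.2 = "#" then (st.1, ic.1 + 1, 0)
        else st)
      ([], 0, 0)).1

-- ===== PORT B =====
-- the while-loop of Source B as recursion on the loop state (positions, offset, rest);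
-- rest[:j] / rest[j+1:] are ported as take/drop, exact here because j = rest.index("#")
-- is a nonnegative in-range index (rest.index cannot raise: '"#" in rest' was just tested).
def pvGoB (positions : List Int) (offset : Int) (rest : List String) : List Int :=
  if h : "#" ∈ rest then
    let j := (PySem.List.index? rest "#").get ((PySem.List.index?_isSome_iff rest "#").mpr h)
    pvGoB (positions ++ PySem.List.pyRange offset (offset + PySem.List.count (rest.take j) "O") 1)
          (offset + (j : Int) + 1) (rest.drop (j + 1))
  else positions ++ PySem.List.pyRange offset (offset + PySem.List.count rest "O") 1
termination_by rest.length
decreasing_by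
  have hp : 0 < rest.length := List.length_pos_iff.mpr (by rintro rfl; simp at h)
  simp only [List.length_drop]; omega

def get_rounded_rocks_final_positions_for_col_alt (col : List String) : List Int :=
  pvGoB [] 0 col

-- ===== PRECONDITION & SPEC =====
def Spec_get_rounded_rocks_final_positions_for_col (col : List String) (out : List Int) : Prop := out = get_rounded_rocks_final_positions_for_col_alt col
instance (col : List String) (out : List Int) : Decidable (Spec_get_rounded_rocks_final_positions_for_col col out) := by unfold Spec_get_rounded_rocks_final_positions_for_col; infer_instance

-- ===== CLAIM (what is proved, stated in full; the proofs are below) =====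
def Claim_equal_get_rounded_rocks_final_positions_for_col : Prop := ∀ (col : List String), Dom_get_rounded_rocks_final_positions_for_col col → Spec_get_rounded_rocks_final_positions_for_col col (get_rounded_rocks_final_positions_for_col col)

-- ===== LEMMAS AND PROOFS =====

-- A's loop as a plain recursion (proof helper): index i, segment start s, rocks-so-far n.
def pvRecA : List String → Int → Int → Int → List Int
  | [], _, _, _ => []
  | c :: cs, i, s, n =>
    if c = "O" then (s + n) :: pvRecA cs (i+1) s (n+1)
    else if c = "#" then pvRecA cs (i+1) (i+1) 0
    else pvRecA cs (i+1) s n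

-- B's segment recursion without the accumulator (proof helper).
def pvH (rest : List String) (b : Int) : List Int :=
  if h : "#" ∈ rest then
    let j := (PySem.List.index? rest "#").get ((PySem.List.index?_isSome_iff rest "#").mpr h)
    PySem.List.pyRange b (b + PySem.List.count (rest.take j) "O") 1 ++
      pvH (rest.drop (j + 1)) (b + (j : Int) + 1)
  else PySem.List.pyRange b (b + PySem.List.count rest "O") 1
termination_by rest.length
decreasing_by
  have hp : 0 < rest.length := List.length_pos_iff.mpr (by rintro rfl; simp at h)
  simp only [List.length_drop]; omega

theorem pvH_unfold (rest : List String) (b : Int) :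
    pvH rest b =
      match PySem.List.index? rest "#" with
      | some j =>
          PySem.List.pyRange b (b + PySem.List.count (rest.take j) "O") 1 ++
            pvH (rest.drop (j + 1)) (b + (j : Int) + 1)
      | none => PySem.List.pyRange b (b + PySem.List.count rest "O") 1 := by
  by_cases h : "#" ∈ rest
  · obtain ⟨j, hj⟩ := Option.isSome_iff_exists.mp ((PySem.List.index?_isSome_iff rest "#").mpr h)
    rw [pvH, dif_pos h]
    simp only [hj, Option.get_some]
  · rw [pvH, dif_neg h, (PySem.List.index?_eq_none_iff rest "#").mpr h]

theorem pvGoB_eq_pvH_aux (N : Nat) :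
    ∀ (rest : List String), rest.length ≤ N → ∀ (acc : List Int) (off : Int),
      pvGoB acc off rest = acc ++ pvH rest off := by
  induction N with
  | zero =>
      intro rest hlen acc off
      have : rest = [] := List.length_eq_zero_iff.mp (Nat.le_zero.mp hlen)
      subst this
      have h : ¬ ("#" ∈ ([] : List String)) := by simp
      rw [pvGoB, dif_neg h, pvH, dif_neg h]
  | succ N ihN =>
      intro rest hlen acc off
      by_cases h : "#" ∈ rest
      · obtain ⟨j, hj⟩ := Option.isSome_iff_exists.mp ((PySem.List.index?_isSome_iff rest "#").mpr h)
        have hp : 0 < rest.length := List.length_pos_iff.mpr (by rintro rfl; simp at h)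
        rw [pvGoB, dif_pos h, pvH, dif_pos h]
        simp only [hj, Option.get_some]
        rw [ihN (rest.drop (j + 1)) (by simp only [List.length_drop]; omega)]
        simp [List.append_assoc]
      · rw [pvGoB, dif_neg h, pvH, dif_neg h]

theorem pvGoB_eq_pvH (rest : List String) (acc : List Int) (off : Int) :
    pvGoB acc off rest = acc ++ pvH rest off :=
  pvGoB_eq_pvH_aux rest.length rest le_rfl acc off

theorem pvRange_succ (a : Int) (k : Nat) :
    PySem.List.pyRange a (a + ((k : Int) + 1)) 1 = a :: PySem.List.pyRange (a + 1) (a + 1 + (k : Int)) 1 := by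
  rw [PySem.List.pyRange_one_cons (by omega)]
  congr 2
  ring

theorem pvRange_empty (a : Int) : PySem.List.pyRange a (a + (0:Int)) 1 = [] := by
  rw [PySem.List.pyRange_one]
  simp

theorem pvFoldA (cs : List String) (acc : List Int) (i s n : Int) :
    ((PySem.List.enumerate cs i).foldl
      (fun (st : List Int × Int × Int) ic =>
        if ic.2 = "O" then (st.1 ++ [st.2.1 + st.2.2], st.2.1, st.2.2 + 1)
        else if ic.2 = "#" then (st.1, ic.1 + 1, 0)
        else st)
      (acc, s, n)).1 = acc ++ pvRecA cs i s n := by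
  induction cs generalizing acc i s n with
  | nil => simp [PySem.List.enumerate_nil, pvRecA]
  | cons c cs ih =>
      rw [PySem.List.enumerate_cons]
      by_cases hO : c = "O"
      · simp [hO, pvRecA, ih, List.append_assoc]
      · by_cases hH : c = "#"
        · simp [hH, pvRecA, ih]
        · simp [hO, hH, pvRecA, ih]

theorem pvRecA_eq (cs : List String) (i s n : Int) :
    pvRecA cs i s n =
      match PySem.List.index? cs "#" with
      | some j =>
          PySem.List.pyRange (s + n) (s + n + PySem.List.count (cs.take j) "O") 1 ++
            pvH (cs.drop (j + 1)) (i + (j : Int) + 1)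
      | none => PySem.List.pyRange (s + n) (s + n + PySem.List.count cs "O") 1 := by
  induction cs generalizing i s n with
  | nil => simp [pvRecA, PySem.List.count_eq]
  | cons c cs ih =>
      by_cases hO : c = "O"
      · subst hO
        have hrec : pvRecA ("O" :: cs) i s n = (s + n) :: pvRecA cs (i+1) s (n+1) := by
          simp [pvRecA]
        rw [hrec, ih, PySem.List.index?_cons_of_ne cs (by decide : ("O" : String) ≠ "#")]
        cases hidx : PySem.List.index? cs "#" with
        | none =>
            simp only [Option.map_none]
            have hcnt : PySem.List.count ("O" :: cs) "O" = PySem.List.count cs "O" + 1 := by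
              simp [PySem.List.count_eq]
            rw [hcnt]
            push_cast
            rw [pvRange_succ]
            ring_nf
        | some j =>
            simp only [Option.map_some]
            rw [List.take_succ_cons]
            have hcnt : PySem.List.count ("O" :: cs.take j) "O"
                = PySem.List.count (cs.take j) "O" + 1 := by
              simp [PySem.List.count_eq]
            rw [hcnt, List.drop_succ_cons]
            push_cast
            rw [pvRange_succ]
            simp only [List.cons_append]
            ring_nf
      · by_cases hH : c = "#"
        · subst hH
          have hrec : pvRecA ("#" :: cs) i s n = pvRecA cs (i+1) (i+1) 0 := by
            simp [pvRecA]
          rw [hrec, ih, PySem.List.index?_cons_self]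
          simp only [List.take_zero, List.drop_succ_cons, List.drop_zero, Nat.cast_zero]
          have hc0 : PySem.List.count ([] : List String) "O" = 0 := rfl
          rw [hc0]
          push_cast
          rw [pvRange_empty, List.nil_append]
          rw [pvH_unfold cs (i + 0 + 1)]
          cases hidx : PySem.List.index? cs "#" with
          | none => ring_nf
          | some j => ring_nf
        · have hrec : pvRecA (c :: cs) i s n = pvRecA cs (i+1) s n := by
            simp [pvRecA, hO, hH]
          rw [hrec, ih, PySem.List.index?_cons_of_ne cs hH]
          cases hidx : PySem.List.index? cs "#" with
          | none =>
              simp only [Option.map_none]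
              have : PySem.List.count (c :: cs) "O" = PySem.List.count cs "O" := by
                simp [PySem.List.count_eq, hO]
              rw [this]
          | some j =>
              simp only [Option.map_some]
              rw [List.take_succ_cons]
              have : PySem.List.count (c :: cs.take j) "O" = PySem.List.count (cs.take j) "O" := by
                simp [PySem.List.count_eq, hO]
              rw [this, List.drop_succ_cons]
              push_cast
              ring_nf

-- ===== VERDICT (by name: the statement is the Claim_ definition above) =====
theorem get_rounded_rocks_final_positions_for_col_spec : Claim_equal_get_rounded_rocks_final_positions_for_col := by
  intro col _
  unfold Spec_get_rounded_rocks_final_positions_for_col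
  unfold get_rounded_rocks_final_positions_for_col get_rounded_rocks_final_positions_for_col_alt
  rw [pvFoldA col [] 0 0 0, pvGoB_eq_pvH, List.nil_append, List.nil_append]
  rw [pvRecA_eq, pvH_unfold]
  cases hidx : PySem.List.index? col "#" with
  | none => simp
  | some j => simp
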